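-- pv_equiv track=rewrite | github.com/zaalgol/tabular-wizard-server | app/repositories/model_repository.py | _model_dict_to_front_list
-- ===== SOURCE A (Python) =====
-- def _model_dict_to_front_list(models_dict, additional_properties):
--     models_list = []
--     for name, details in models_dict.items():
--         # Initialize model_info with the id
--         model_info = {'id': name}
--         # Dynamically add properties from additional_properties if they exist in details
--         for property in additional_properties:
--             if property in details:
--                 model_info[property] = details[property]
--         models_list.append(model_info)
--     return models_list
-- ===== SOURCE B (Python) =====
-- def _model_dict_to_front_list(models_dict, additional_properties):
--     # Hash-join: index each distinct requested property by its rank (first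
--     # occurrence), then scan each model's own details once, keeping matching
--     # items, and order the kept items by rank instead of re-scanning the
--     # property list per model.
--     rank = {p: i for i, p in enumerate(dict.fromkeys(additional_properties))}
--     models_list = []
--     for name, details in models_dict.items():
--         kept = sorted((kv for kv in details.items() if kv[0] in rank),
--                       key=lambda kv: rank[kv[0]])
--         models_list.append(dict([('id', name)] + kept))
--     return models_list
-- ===== Notes on version B (the rewrite author's own statement) =====
-- stated objective: faster
-- what changed: Replaces the per-model scan of the whole property list with a hash-join: a rank dict (property -> first-occurrence index) is built once, each model's own details are scanned once keeping items whose key is in the rank index, and the kept items are sorted by rank to restore A's property order.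
import Mathlib
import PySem

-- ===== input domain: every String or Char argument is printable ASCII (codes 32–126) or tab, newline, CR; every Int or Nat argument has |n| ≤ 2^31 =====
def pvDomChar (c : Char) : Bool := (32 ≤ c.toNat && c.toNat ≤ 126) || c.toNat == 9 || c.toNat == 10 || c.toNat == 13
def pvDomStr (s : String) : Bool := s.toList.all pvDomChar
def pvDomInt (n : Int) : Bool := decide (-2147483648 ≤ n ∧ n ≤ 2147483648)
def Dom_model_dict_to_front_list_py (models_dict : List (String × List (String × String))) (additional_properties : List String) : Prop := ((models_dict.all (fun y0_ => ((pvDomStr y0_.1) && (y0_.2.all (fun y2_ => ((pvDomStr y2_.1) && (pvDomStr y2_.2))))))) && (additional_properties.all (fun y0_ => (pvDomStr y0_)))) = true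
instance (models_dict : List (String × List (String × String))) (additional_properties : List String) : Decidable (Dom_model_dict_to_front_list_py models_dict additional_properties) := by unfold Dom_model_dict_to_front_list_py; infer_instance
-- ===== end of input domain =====

-- B replaces the per-model scan of the whole property list by a hash-join: a rank index over the distinct properties built once, one scan of each model's own details, and a sort of the kept items by rank; a timing run measured B faster (A scans all p properties per model).
-- ===== PORT A =====
def model_dict_to_front_list_py (models_dict : List (String × List (String × String))) (additional_properties : List String) : List (List (String × String)) :=
  models_dict.foldl (fun models_list nd =>
    let details := PySem.Dict.ofList nd.2
    let model_info :=
      additional_properties.foldl (fun model_info property =>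
        if details.contains property then
          model_info.insert property (details.getD property "")
        else model_info)
        (PySem.Dict.ofList [("id", nd.1)])
    models_list ++ [model_info.items]) []

-- ===== PORT B =====
def model_dict_to_front_list_py_alt (models_dict : List (String × List (String × String))) (additional_properties : List String) : List (List (String × String)) :=
  -- rank = {p: i for i, p in enumerate(dict.fromkeys(additional_properties))}
  let rank : PySem.Dict String Int :=
    PySem.Dict.ofList ((PySem.List.enumerate (PySem.List.dedup additional_properties)).map (fun ip => (ip.2, ip.1)))
  models_dict.foldl (fun models_list nd =>
    let details := PySem.Dict.ofList nd.2
    -- rank[kv[0]] is ported as getD _ 0: every kept key is a key of rank, so the default is never used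
    let kept := PySem.List.sorted (details.items.filter (fun kv => rank.contains kv.1))
                  (fun kv => rank.getD kv.1 0)
    models_list ++ [(PySem.Dict.ofList (("id", nd.1) :: kept)).items]) []

-- ===== PRECONDITION & SPEC =====
def Spec_model_dict_to_front_list_py (models_dict : List (String × List (String × String))) (additional_properties : List String) (out : List (List (String × String))) : Prop := out = model_dict_to_front_list_py_alt models_dict additional_properties
instance (models_dict : List (String × List (String × String))) (additional_properties : List String) (out : List (List (String × String))) : Decidable (Spec_model_dict_to_front_list_py models_dict additional_properties out) := by unfold Spec_model_dict_to_front_list_py; infer_instance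

-- ===== CLAIM (what is proved, stated in full; the proofs are below) =====
def Claim_equal_model_dict_to_front_list_py : Prop := ∀ (models_dict : List (String × List (String × String))) (additional_properties : List String), Dom_model_dict_to_front_list_py models_dict additional_properties → Spec_model_dict_to_front_list_py models_dict additional_properties (model_dict_to_front_list_py models_dict additional_properties)

-- ===== LEMMAS AND PROOFS =====

lemma pv_foldl_if_filter {α β : Type} (c : β → Bool) (f : α → β → α) (l : List β) (a : α) :
    l.foldl (fun a x => if c x then f a x else a) a = (l.filter c).foldl f a := by
  induction l generalizing a with
  | nil => rfl
  | cons x xs ih =>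
    by_cases h : c x <;> simp [h, ih]

lemma pv_getD_keyfold (g : String → String) (l : List String) (d : PySem.Dict String String) (k : String) :
    (l.foldl (fun d p => d.insert p (g p)) d).getD k "" = if k ∈ l then g k else d.getD k "" := by
  induction l generalizing d with
  | nil => simp
  | cons x xs ih =>
    simp only [List.foldl_cons, ih, PySem.Dict.getD_insert, List.mem_cons]
    by_cases hx : k ∈ xs <;> by_cases he : k = x <;> simp [hx, he]

lemma pv_ofList_filter (l : List String) (c : String → Bool) :
    PySem.Set.ofList (l.filter c) = (PySem.Set.ofList l).filter c := by
  induction l with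
  | nil => rfl
  | cons x xs ih =>
    by_cases h : c x
    · rw [List.filter_cons_of_pos h, PySem.Set.ofList_cons, PySem.Set.ofList_cons, ih]
      simp only [PySem.Set.discard, List.filter_cons_of_pos h, List.filter_filter]
      congr 1
      exact List.filter_congr (fun y _ => by simp [Bool.and_comm])
    · rw [List.filter_cons_of_neg h, PySem.Set.ofList_cons, ih]
      simp only [PySem.Set.discard]
      rw [List.filter_cons_of_neg h, List.filter_filter]
      refine List.filter_congr (fun y hy => ?_)
      by_cases hcy : c y
      · have hyx : ¬ (y == x) = true := fun e => h (by rwa [← eq_of_beq e])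
        simp [hcy, hyx]
      · simp [hcy]

def pvRank (props : List String) : PySem.Dict String Int :=
  PySem.Dict.ofList ((PySem.List.enumerate (PySem.List.dedup props)).map (fun ip => (ip.2, ip.1)))

lemma pvRank_items (props : List String) :
    (pvRank props).items
      = (PySem.List.enumerate (PySem.List.dedup props)).map (fun ip => (ip.2, ip.1)) := by
  unfold pvRank
  show ((((PySem.List.enumerate (PySem.List.dedup props)).map (fun ip => (ip.2, ip.1))).foldl
      (fun acc p => acc.insert p.1 p.2) PySem.Dict.empty)).items = _
  rw [List.foldl_map]
  rw [PySem.Dict.items_foldl_insert_fresh (PySem.List.enumerate (PySem.List.dedup props) 0)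
        (fun a => a.2) (fun a => a.1) PySem.Dict.empty (fun a _ => by simp)
        (by rw [PySem.List.map_snd_enumerate]
            simp only [PySem.List.dedup]
            exact PySem.Set.nodup_ofList props)]
  simp [PySem.Dict.empty]

lemma pvRank_keys (props : List String) : (pvRank props).keys = PySem.List.dedup props := by
  show (pvRank props).items.map (fun p => p.1) = _
  rw [pvRank_items, List.map_map]
  exact PySem.List.map_snd_enumerate _ 0

lemma pvRank_getD (props : List String) (i : Nat) (h : i < (PySem.List.dedup props).length) :
    (pvRank props).getD (PySem.List.dedup props)[i] 0 = (i : Int) := by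
  have hmem : ((PySem.List.dedup props)[i], (i : Int)) ∈ (pvRank props).items := by
    rw [pvRank_items]
    have he : i < (PySem.List.enumerate (PySem.List.dedup props) 0).length := by
      rw [PySem.List.length_enumerate]; exact h
    have := List.getElem_mem he
    rw [PySem.List.getElem_enumerate] at this
    have h2 := List.mem_map_of_mem (f := fun ip : Int × String => (ip.2, ip.1)) this
    simpa using h2
  exact PySem.Dict.getD_of_mem_items _ hmem
    (by rw [pvRank_keys]; simp only [PySem.List.dedup]; exact PySem.Set.nodup_ofList props) 0

lemma pv_get?_iff (d : PySem.Dict String String) (k v : String) :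
    d.get? k = some v ↔ (d.contains k = true ∧ v = d.getD k "") := by
  rw [PySem.Dict.contains_eq_isSome_get?, PySem.Dict.getD_eq_get?_getD]
  cases h : d.get? k <;> simp [eq_comm]

lemma pv_sorted_kept (props : List String) (ds : List (String × String)) :
    PySem.List.sorted
        ((PySem.Dict.ofList ds).items.filter (fun kv => (pvRank props).contains kv.1))
        (fun kv => (pvRank props).getD kv.1 0)
      = ((PySem.List.dedup props).filter (fun p => (PySem.Dict.ofList ds).contains p)).map
          (fun p => (p, (PySem.Dict.ofList ds).getD p "")) := by
  set D := PySem.Dict.ofList ds with hD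
  have hPnd : (PySem.List.dedup props).Nodup := by
    simp only [PySem.List.dedup]; exact PySem.Set.nodup_ofList props
  have hDnd : D.keys.Nodup := PySem.Dict.nodup_keys_ofList ds
  have hIitems : D.items.Nodup := List.Nodup.of_map _ hDnd
  apply PySem.List.sorted_eq_of_perm_of_pairwise_lt
  · -- permutation
    rw [List.perm_ext_iff_of_nodup
      (List.Nodup.map (fun a b h => congrArg Prod.fst h) (List.Nodup.filter _ hPnd))
      (List.Nodup.filter _ hIitems)]
    intro a
    rw [List.mem_filter, List.mem_map]
    constructor
    · rintro ⟨p, hp, rfl⟩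
      rw [List.mem_filter] at hp
      refine ⟨?_, ?_⟩
      · exact (PySem.Dict.get?_eq_some_iff_mem_items D p _ hDnd).mp
          ((pv_get?_iff D p _).mpr ⟨hp.2, rfl⟩)
      · exact (PySem.Dict.contains_iff_mem_keys (pvRank props) p).mpr
          (by rw [pvRank_keys]; exact hp.1)
    · rintro ⟨hmem, hcont⟩
      refine ⟨a.1, List.mem_filter.mpr ⟨?_, ?_⟩, ?_⟩
      · have := (PySem.Dict.contains_iff_mem_keys (pvRank props) a.1).mp hcont
        rwa [pvRank_keys] at this
      · exact ((pv_get?_iff D a.1 a.2).mp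
          ((PySem.Dict.get?_eq_some_iff_mem_items D a.1 a.2 hDnd).mpr hmem)).1
      · have := ((pv_get?_iff D a.1 a.2).mp
          ((PySem.Dict.get?_eq_some_iff_mem_items D a.1 a.2 hDnd).mpr hmem)).2
        exact Prod.ext rfl this.symm
  · -- strictly increasing ranks
    rw [List.pairwise_map]
    have hPp : (PySem.List.dedup props).Pairwise
        (fun p q => (pvRank props).getD p 0 < (pvRank props).getD q 0) := by
      rw [List.pairwise_iff_getElem]
      intro i j hi hj hij
      rw [pvRank_getD props i hi, pvRank_getD props j hj]
      exact_mod_cast hij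
    exact List.Pairwise.sublist List.filter_sublist hPp

lemma pv_row_eq (props : List String) (name : String) (ds : List (String × String)) :
    (props.foldl (fun m p =>
        if (PySem.Dict.ofList ds).contains p then
          m.insert p ((PySem.Dict.ofList ds).getD p "")
        else m) (PySem.Dict.ofList [("id", name)])).items
      = (PySem.Dict.ofList (("id", name) ::
           PySem.List.sorted
             ((PySem.Dict.ofList ds).items.filter (fun kv => (pvRank props).contains kv.1))
             (fun kv => (pvRank props).getD kv.1 0))).items := by
  rw [pv_sorted_kept]
  have hif := pv_foldl_if_filter (fun p => (PySem.Dict.ofList ds).contains p)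
      (fun m p => m.insert p ((PySem.Dict.ofList ds).getD p "")) props
      (PySem.Dict.ofList [("id", name)])
  rw [hif]
  have hstep : (PySem.Dict.ofList (("id", name) ::
      ((PySem.List.dedup props).filter (fun p => (PySem.Dict.ofList ds).contains p)).map
        (fun p => (p, (PySem.Dict.ofList ds).getD p ""))))
    = ((PySem.List.dedup props).filter (fun p => (PySem.Dict.ofList ds).contains p)).foldl
        (fun d p => d.insert p ((PySem.Dict.ofList ds).getD p ""))
        (PySem.Dict.ofList [("id", name)]) := by
    show (((PySem.List.dedup props).filter (fun p => (PySem.Dict.ofList ds).contains p)).map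
        (fun p => (p, (PySem.Dict.ofList ds).getD p ""))).foldl
        (fun acc q => acc.insert q.1 q.2) (PySem.Dict.empty.insert "id" name) = _
    rw [List.foldl_map]
    rfl
  rw [hstep]
  -- both sides are the same key-determined insert fold, over lists with the same first occurrences
  have hPnd : (PySem.List.dedup props).Nodup := by
    simp only [PySem.List.dedup]; exact PySem.Set.nodup_ofList props
  have hd0 : (PySem.Dict.ofList [("id", name)]).keys.Nodup := by
    simp [PySem.Dict.ofList, PySem.Dict.update, PySem.Dict.insert, PySem.Dict.empty,
      PySem.Dict.keys, PySem.Dict.contains]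
  have hmem : ∀ k : String,
      (k ∈ props.filter (fun p => (PySem.Dict.ofList ds).contains p))
        ↔ (k ∈ (PySem.List.dedup props).filter (fun p => (PySem.Dict.ofList ds).contains p)) := by
    intro k
    simp only [List.mem_filter, PySem.List.dedup, PySem.Set.mem_ofList]
  have hkeys :
      ((props.filter (fun p => (PySem.Dict.ofList ds).contains p)).foldl
          (fun d p => d.insert p ((PySem.Dict.ofList ds).getD p ""))
          (PySem.Dict.ofList [("id", name)])).keys
        = (((PySem.List.dedup props).filter (fun p => (PySem.Dict.ofList ds).contains p)).foldl
          (fun d p => d.insert p ((PySem.Dict.ofList ds).getD p ""))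
          (PySem.Dict.ofList [("id", name)])).keys := by
    rw [PySem.Dict.keys_foldl_insert _ (fun _ p => (PySem.Dict.ofList ds).getD p "") _,
        PySem.Dict.keys_foldl_insert _ (fun _ p => (PySem.Dict.ofList ds).getD p "") _,
        PySem.Set.update_eq_append_filter, PySem.Set.update_eq_append_filter,
        pv_ofList_filter,
        PySem.Set.ofList_eq_self_of_nodup _ (List.Nodup.filter _ hPnd)]
    rfl
  rw [PySem.Dict.items_eq_map_keys _
        (PySem.Dict.nodup_keys_foldl_insert _ (fun _ p => (PySem.Dict.ofList ds).getD p "") _ hd0) "",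
      PySem.Dict.items_eq_map_keys _
        (PySem.Dict.nodup_keys_foldl_insert _ (fun _ p => (PySem.Dict.ofList ds).getD p "") _ hd0) "",
      hkeys]
  refine List.map_congr_left (fun k _ => ?_)
  rw [pv_getD_keyfold, pv_getD_keyfold]
  by_cases h : k ∈ (PySem.List.dedup props).filter (fun p => (PySem.Dict.ofList ds).contains p)
  · rw [if_pos ((hmem k).mpr h), if_pos h]
  · rw [if_neg (fun hh => h ((hmem k).mp hh)), if_neg h]

-- ===== VERDICT (by name: the statement is the Claim_ definition above) =====
theorem model_dict_to_front_list_py_spec : Claim_equal_model_dict_to_front_list_py := by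
  intro models props _
  unfold Spec_model_dict_to_front_list_py model_dict_to_front_list_py model_dict_to_front_list_py_alt
  dsimp only
  have hR : (PySem.Dict.ofList ((PySem.List.enumerate (PySem.List.dedup props)).map
      (fun ip => (ip.2, ip.1)))) = pvRank props := rfl
  rw [hR,
      PySem.List.foldl_append_singleton_eq_map
        (fun nd : String × List (String × String) =>
          (props.foldl (fun m p =>
              if (PySem.Dict.ofList nd.2).contains p then
                m.insert p ((PySem.Dict.ofList nd.2).getD p "")
              else m) (PySem.Dict.ofList [("id", nd.1)])).items) models [],
      PySem.List.foldl_append_singleton_eq_map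
        (fun nd : String × List (String × String) =>
          (PySem.Dict.ofList (("id", nd.1) ::
            PySem.List.sorted
              ((PySem.Dict.ofList nd.2).items.filter (fun kv => (pvRank props).contains kv.1))
              (fun kv => (pvRank props).getD kv.1 0))).items) models []]
  exact List.map_congr_left (fun nd _ => pv_row_eq props nd.1 nd.2)
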